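-- pv_equiv track=rewrite | github.com/joserenter1a/leetcode | interview_qs/microsoft/ms2.py | find_well_structured_words
-- ===== SOURCE A (Python) =====
-- from collections import defaultdict
--
-- MOD = 1000000007
--
-- def factorial(n):
--     res = 1
--     for i in range(2, n+1):
--         res = (res*i)%MOD
--     return res
--
-- def modulo_inverse(num):
--     return pow(num, MOD-2, MOD)
--
-- def modulo_division(num, denom):
--     return (num*modulo_inverse(denom))%MOD
--
-- def findPermutations(freqs, ct):
--     res = factorial(ct)
--     for size in freqs.values():
--         res = modulo_division(res, factorial(size))
--
--     return res
--
-- def find_well_structured_words(S):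
--     vowels = {'A','E','I','O','U'}
--
--     vowel_freq = defaultdict(int)
--     vowel_count = 0
--
--     consonant_freq = defaultdict(int)
--     consonant_count = 0
--
--     for char in S:
--         if char in vowels:
--             vowel_freq[char] += 1
--             vowel_count += 1
--         else:
--             consonant_freq[char] += 1
--             consonant_count += 1
--
--     res1 = findPermutations(vowel_freq, vowel_count)
--     res2 = findPermutations(consonant_freq, consonant_count)
--
--     return 0 if consonant_count < vowel_count else (res1*res2) % MOD
-- ===== SOURCE B (Python) =====
-- MOD = 1000000007
--
-- def modulo_inverse(num):
--     return pow(num, MOD-2, MOD)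
--
-- def modulo_division(num, denom):
--     return (num*modulo_inverse(denom))%MOD
--
-- def find_well_structured_words(S):
--     vowels = {'A','E','I','O','U'}
--     # online multinomial accumulation: no factorial tables, one pass over S
--     res1 = 1
--     res2 = 1
--     vowel_count = 0
--     consonant_count = 0
--     vf = {}
--     cf = {}
--     for char in S:
--         if char in vowels:
--             vowel_count += 1
--             vf[char] = vf.get(char, 0) + 1
--             res1 = modulo_division((res1 * vowel_count) % MOD, vf[char])
--         else:
--             consonant_count += 1
--             cf[char] = cf.get(char, 0) + 1
--             res2 = modulo_division((res2 * consonant_count) % MOD, cf[char])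
--     return 0 if consonant_count < vowel_count else (res1 * res2) % MOD
-- ===== Notes on version B (the rewrite author's own statement) =====
-- stated objective: alternative
-- what changed: A counts all frequencies first and then divides a factorial by the factorials of the counts via two helper functions; B drops those helpers and accumulates both multinomials online in the single pass, multiplying by the running count and dividing by the letter's new frequency at each character (it pays one modular inverse per character, so it trades speed for a one-pass structure).
import Mathlib
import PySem

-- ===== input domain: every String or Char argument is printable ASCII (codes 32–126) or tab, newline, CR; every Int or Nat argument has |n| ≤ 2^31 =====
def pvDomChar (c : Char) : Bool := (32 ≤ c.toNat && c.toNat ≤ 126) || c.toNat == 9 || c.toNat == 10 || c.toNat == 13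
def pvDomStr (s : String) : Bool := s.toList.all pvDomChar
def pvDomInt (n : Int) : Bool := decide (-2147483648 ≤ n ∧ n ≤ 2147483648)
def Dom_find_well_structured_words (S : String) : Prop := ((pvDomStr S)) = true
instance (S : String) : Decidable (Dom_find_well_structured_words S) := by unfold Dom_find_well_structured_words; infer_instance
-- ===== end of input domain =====

-- B replaces the two-phase "count frequencies, then factorial(n) over product of factorials" computation
-- by a single pass accumulating both multinomials online; alternative decomposition, same cost.

-- ===== PORT A =====
def pvMOD : Int := 1000000007

def pvFactorial (n : Int) : Int :=
  (PySem.List.pyRange 2 (n + 1) 1).foldl (fun res i => PySem.Int.mod (res * i) pvMOD) 1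

-- hand port of Python's three-argument pow (binary exponentiation); for a positive modulus it
-- returns exactly pow(base, e, m): each step reduces with Python's mod (Int.fmod)
def pvPowMod (b : Int) (e : Nat) (m : Int) : Int :=
  if h : e = 0 then PySem.Int.mod 1 m
  else
    let r := pvPowMod b (e / 2) m
    let r2 := PySem.Int.mod (r * r) m
    if e % 2 = 1 then PySem.Int.mod (r2 * b) m else r2
termination_by e
decreasing_by exact Nat.div_lt_self (Nat.pos_of_ne_zero h) one_lt_two

def pvModInv (num : Int) : Int := pvPowMod num (pvMOD - 2).toNat pvMOD

def pvModDiv (num denom : Int) : Int := PySem.Int.mod (num * pvModInv denom) pvMOD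

def pvFindPermutations (freqs : PySem.Dict Char Int) (ct : Int) : Int :=
  freqs.values.foldl (fun res size => pvModDiv res (pvFactorial size)) (pvFactorial ct)

def pvVowels : PySem.Set Char := PySem.Set.ofList ['A', 'E', 'I', 'O', 'U']

def pvAStep (st : PySem.Dict Char Int × Int × PySem.Dict Char Int × Int) (c : Char) :
    PySem.Dict Char Int × Int × PySem.Dict Char Int × Int :=
  if pvVowels.contains c then
    (st.1.modify c 0 (· + 1), st.2.1 + 1, st.2.2.1, st.2.2.2)
  else
    (st.1, st.2.1, st.2.2.1.modify c 0 (· + 1), st.2.2.2 + 1)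

def find_well_structured_words (S : String) : Int :=
  let st := S.toList.foldl pvAStep (PySem.Dict.empty, 0, PySem.Dict.empty, 0)
  let res1 := pvFindPermutations st.1 st.2.1
  let res2 := pvFindPermutations st.2.2.1 st.2.2.2
  if st.2.2.2 < st.2.1 then 0 else PySem.Int.mod (res1 * res2) pvMOD

-- ===== PORT B =====
-- state: (res1, res2, vowel_count, consonant_count, vowel_freq, consonant_freq)
def pvBStep (st : Int × Int × Int × Int × PySem.Dict Char Int × PySem.Dict Char Int) (c : Char) :
    Int × Int × Int × Int × PySem.Dict Char Int × PySem.Dict Char Int :=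
  if pvVowels.contains c then
    let vc := st.2.2.1 + 1
    let vf := st.2.2.2.2.1.modify c 0 (· + 1)
    (pvModDiv (PySem.Int.mod (st.1 * vc) pvMOD) (vf.getD c 0), st.2.1, vc, st.2.2.2.1, vf, st.2.2.2.2.2)
  else
    let cc := st.2.2.2.1 + 1
    let cf := st.2.2.2.2.2.modify c 0 (· + 1)
    (st.1, pvModDiv (PySem.Int.mod (st.2.1 * cc) pvMOD) (cf.getD c 0), st.2.2.1, cc, st.2.2.2.2.1, cf)

def find_well_structured_words_alt (S : String) : Int :=
  let st := S.toList.foldl pvBStep (1, 1, 0, 0, PySem.Dict.empty, PySem.Dict.empty)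
  if st.2.2.2.1 < st.2.2.1 then 0 else PySem.Int.mod (st.1 * st.2.1) pvMOD

-- ===== PRECONDITION & SPEC =====
def Spec_find_well_structured_words (S : String) (out : Int) : Prop := out = find_well_structured_words_alt S
instance (S : String) (out : Int) : Decidable (Spec_find_well_structured_words S out) := by unfold Spec_find_well_structured_words; infer_instance

-- ===== CLAIM (what is proved, stated in full; the proofs are below) =====
def Claim_equal_find_well_structured_words : Prop := ∀ (S : String), Dom_find_well_structured_words S → Spec_find_well_structured_words S (find_well_structured_words S)

-- ===== LEMMAS AND PROOFS =====

-- the field ZMod p in which both computations are compared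
abbrev pvK : Type := ZMod 1000000007

def pvG (x : pvK) : pvK := x ^ (1000000005 : ℕ)

def pvFc (n : Int) : pvK := ((PySem.List.pyRange 2 (n + 1) 1).map (fun i : Int => (i : pvK))).prod

def pvPhi (W : List Char) : pvK :=
  pvFc (W.length : Int) * ((PySem.List.dedup W).map (fun c => pvG (pvFc ((W.count c : Int))))).prod

-- single-category step of B: state (res, count, freq)
def pvBStep1 (st : Int × Int × PySem.Dict Char Int) (c : Char) : Int × Int × PySem.Dict Char Int :=
  let n := st.2.1 + 1
  let d := st.2.2.modify c 0 (· + 1)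
  (pvModDiv (PySem.Int.mod (st.1 * n) pvMOD) (d.getD c 0), n, d)

lemma pvCast_MOD : ((1000000007 : ℕ) : pvK) = 0 := ZMod.natCast_self _

lemma pvCast_MODK : (1000000007 : pvK) = 0 := by exact_mod_cast pvCast_MOD

lemma pvCast_mod (x : Int) : ((PySem.Int.mod x pvMOD : Int) : pvK) = (x : pvK) := by
  have h : PySem.Int.mod x pvMOD = x - pvMOD * Int.fdiv x pvMOD := Int.fmod_def x pvMOD
  rw [h]
  simp only [pvMOD]
  push_cast
  rw [pvCast_MODK]
  ring

lemma pvMod_congr {x y : Int} (h : (x : pvK) = (y : pvK)) :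
    PySem.Int.mod x pvMOD = PySem.Int.mod y pvMOD := by
  have := (ZMod.intCast_eq_intCast_iff x y 1000000007).mp h
  have he : x % (1000000007 : ℤ) = y % (1000000007 : ℤ) := this
  show Int.fmod x pvMOD = Int.fmod y pvMOD
  rw [Int.fmod_eq_emod, Int.fmod_eq_emod]
  simp only [pvMOD]
  rw [he]
  norm_num

lemma pvPowMod_cast (b : Int) (e : Nat) : ((pvPowMod b e pvMOD : Int) : pvK) = (b : pvK) ^ e := by
  induction e using Nat.strong_induction_on with
  | _ e ih =>
    rw [pvPowMod]
    by_cases h : e = 0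
    · rw [dif_pos h, h, pvCast_mod]
      simp
    · rw [dif_neg h]
      have ih2 := ih (e / 2) (Nat.div_lt_self (Nat.pos_of_ne_zero h) one_lt_two)
      by_cases hp : e % 2 = 1
      · rw [if_pos hp, pvCast_mod, Int.cast_mul, pvCast_mod, Int.cast_mul, ih2,
          ← pow_add, ← pow_succ]
        exact congrArg (fun t => (b : pvK) ^ t) (by omega)
      · rw [if_neg hp, pvCast_mod, Int.cast_mul, ih2, ← pow_add]
        exact congrArg (fun t => (b : pvK) ^ t) (by omega)

lemma pvCast_modDiv (a b : Int) : ((pvModDiv a b : Int) : pvK) = (a : pvK) * pvG (b : pvK) := by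
  have he : (pvMOD - 2).toNat = 1000000005 := by simp only [pvMOD]; rfl
  rw [pvModDiv, pvCast_mod, Int.cast_mul, pvModInv, he, pvPowMod_cast]
  rfl

lemma pvCast_foldl_mul_mod (l : List Int) (init : Int) :
    ((l.foldl (fun res i => PySem.Int.mod (res * i) pvMOD) init : Int) : pvK)
      = (init : pvK) * (l.map (fun i : Int => (i : pvK))).prod := by
  induction l generalizing init with
  | nil => simp
  | cons x xs ih => simp [ih, pvCast_mod, mul_assoc]

lemma pvCast_fact (n : Int) : ((pvFactorial n : Int) : pvK) = pvFc n := by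
  simp [pvFactorial, pvFc, pvCast_foldl_mul_mod]

lemma pvFc_succ {n : Int} (h : 0 ≤ n) : pvFc (n + 1) = pvFc n * ((n : pvK) + 1) := by
  rcases eq_or_lt_of_le h with heq | hpos
  · rw [← heq]
    simp [pvFc, PySem.List.pyRange_one_eq_nil (by norm_num : (2:ℤ) ≤ 2),
      PySem.List.pyRange_one_eq_nil (by norm_num : (1:ℤ) ≤ 2)]
  · have h2 : PySem.List.pyRange 2 (n + 1 + 1) 1 = PySem.List.pyRange 2 (n + 1) 1 ++ [n + 1] :=
      PySem.List.pyRange_one_succ_right (by omega)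
    simp [pvFc, h2]

lemma pvFc_one : pvFc 1 = 1 := by
  simp [pvFc, PySem.List.pyRange_one_eq_nil (by norm_num : (2:ℤ) ≤ 2)]

lemma pvG_mul (x y : pvK) : pvG (x * y) = pvG x * pvG y := mul_pow x y 1000000005

lemma pvG_one : pvG 1 = 1 := one_pow 1000000005

lemma pvCast_findPerm (l : List Int) (init : Int) :
    ((l.foldl (fun res size => pvModDiv res (pvFactorial size)) init : Int) : pvK)
      = (init : pvK) * (l.map (fun s => pvG (pvFc s))).prod := by
  induction l generalizing init with
  | nil => simp
  | cons x xs ih =>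
    rw [List.foldl_cons, ih, pvCast_modDiv, pvCast_fact, List.map_cons, List.prod_cons, mul_assoc]

lemma pvValues_eq_map_getD {κ ν : Type} [BEq κ] [LawfulBEq κ] (d : PySem.Dict κ ν) (d0 : ν)
    (h : d.keys.Nodup) : d.values = d.keys.map (fun k => d.getD k d0) := by
  obtain ⟨items⟩ := d
  induction items with
  | nil => rfl
  | cons p rest ih =>
    obtain ⟨k, v⟩ := p
    have h' : k ∉ List.map (fun x : κ × ν => x.1) rest ∧ (List.map (fun x : κ × ν => x.1) rest).Nodup := by
      simpa only [PySem.Dict.keys, List.map_cons, List.nodup_cons] using h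
    show v :: List.map (fun x => x.2) rest
        = List.map (fun k' => (PySem.Dict.mk ((k, v) :: rest)).getD k' d0)
            (k :: List.map (fun x => x.1) rest)
    rw [List.map_cons]
    congr 1
    · simp [PySem.Dict.getD, PySem.Dict.get?_mk_cons]
    · have ihr := ih (by simpa only [PySem.Dict.keys] using h'.2)
      rw [show (List.map (fun x : κ × ν => x.2) rest)
          = List.map (fun k' => (PySem.Dict.mk rest).getD k' d0)
              (List.map (fun x : κ × ν => x.1) rest) from ihr]
      apply List.map_congr_left
      intro x hx
      have hxk : ¬(k == x) = true := fun hc => h'.1 ((eq_of_beq hc) ▸ hx)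
      simp [PySem.Dict.getD, PySem.Dict.get?_mk_cons, hxk]

lemma pvAux1 (W : List Char) (F : Int → pvK) :
    ((PySem.Dict.counter W).values).map F
      = (PySem.Set.ofList W).map (fun k => F ((PySem.Dict.counter W).getD k 0)) := by
  have hval : (PySem.Dict.counter W).values
      = (PySem.Dict.counter W).keys.map (fun k => (PySem.Dict.counter W).getD k 0) :=
    pvValues_eq_map_getD _ 0 (by rw [PySem.Dict.keys_counter]; exact PySem.Set.nodup_ofList W)
  rw [hval, PySem.Dict.keys_counter, List.map_map]
  rfl

lemma pvAux2 (W : List Char) :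
    ((PySem.Set.ofList W).map (fun k => pvG (pvFc ((PySem.Dict.counter W).getD k 0)))).prod
      = ((PySem.Set.ofList W).map (fun c => pvG (pvFc ((List.count c W : Int))))).prod := by
  apply congrArg List.prod
  apply List.map_congr_left
  intro x hx
  exact congrArg (fun t => pvG (pvFc t)) (PySem.Dict.getD_counter W x)

lemma pvCast_aRes (W : List Char) :
    ((pvFindPermutations (PySem.Dict.counter W) (W.length : Int) : Int) : pvK) = pvPhi W := by
  unfold pvFindPermutations
  rw [pvCast_findPerm, pvCast_fact, pvAux1 W (fun s => pvG (pvFc s)), pvAux2 W]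
  unfold pvPhi
  rw [PySem.List.dedup_eq_ofList]

-- dedup of a snoc
lemma pvDedup_snoc (W : List Char) (c : Char) :
    PySem.List.dedup (W ++ [c]) = if c ∈ W then PySem.List.dedup W else PySem.List.dedup W ++ [c] := by
  rw [PySem.List.dedup_eq_ofList, PySem.List.dedup_eq_ofList]
  have hfold : PySem.Set.ofList (W ++ [c]) = PySem.Set.add (PySem.Set.ofList W) c := by
    simp [PySem.Set.ofList, List.foldl_append]
  rw [hfold]
  by_cases hc : c ∈ W
  · have hmem : PySem.Set.contains (PySem.Set.ofList W) c = true := by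
      show List.contains (PySem.Set.ofList W) c = true
      exact List.contains_iff_mem.mpr ((PySem.Set.mem_ofList W c).mpr hc)
    simp [PySem.Set.add, hmem, hc]
  · have hmem : ¬ PySem.Set.contains (PySem.Set.ofList W) c = true := by
      show ¬ List.contains (PySem.Set.ofList W) c = true
      intro h
      exact hc ((PySem.Set.mem_ofList W c).mp (List.contains_iff_mem.mp h))
    simp [PySem.Set.add, hmem, hc]

lemma pvProd_map_update (l : List Char) (φ ψ : Char → pvK) (c : Char) (t : pvK)
    (hnd : l.Nodup) (hc : c ∈ l) (h1 : ψ c = φ c * t)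
    (h2 : ∀ x ∈ l, x ≠ c → ψ x = φ x) :
    (l.map ψ).prod = (l.map φ).prod * t := by
  induction l with
  | nil => simp at hc
  | cons a as ih =>
    simp only [List.map_cons, List.prod_cons]
    rcases List.mem_cons.mp hc with rfl | hmem
    · have : ∀ x ∈ as, ψ x = φ x := by
        intro x hx
        exact h2 x (List.mem_cons_of_mem _ hx) (fun h => (List.nodup_cons.mp hnd).1 (h ▸ hx))
      rw [h1, List.map_congr_left this]
      ring
    · have ha : a ≠ c := fun h => (List.nodup_cons.mp hnd).1 (h ▸ hmem)
      rw [h2 a (List.mem_cons_self) ha,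
        ih (List.nodup_cons.mp hnd).2 hmem (fun x hx hxc => h2 x (List.mem_cons_of_mem _ hx) hxc)]
      ring

lemma pvPhi_snoc (W : List Char) (c : Char) :
    pvPhi (W ++ [c]) = pvPhi W * ((W.length : pvK) + 1) * pvG ((W.count c : pvK) + 1) := by
  have hlen : pvFc ((W ++ [c]).length : Int) = pvFc (W.length : Int) * ((W.length : pvK) + 1) := by
    have := pvFc_succ (n := (W.length : Int)) (by positivity)
    simpa [List.length_append] using this
  by_cases hc : c ∈ W
  · have hcount : (W ++ [c]).count c = W.count c + 1 := by
      simp [List.count_append]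
    have hprod : ((PySem.List.dedup (W ++ [c])).map (fun x => pvG (pvFc (((W ++ [c]).count x : Int))))).prod
        = ((PySem.List.dedup W).map (fun x => pvG (pvFc ((W.count x : Int))))).prod
            * pvG ((W.count c : pvK) + 1) := by
      rw [pvDedup_snoc, if_pos hc]
      apply pvProd_map_update _ _ _ c _ (by
          rw [PySem.List.dedup_eq_ofList]; exact PySem.Set.nodup_ofList W)
        (by rw [PySem.List.dedup_eq_ofList]; exact (PySem.Set.mem_ofList W c).mpr hc)
      · rw [hcount]
        have : ((W.count c + 1 : ℕ) : Int) = (W.count c : Int) + 1 := by push_cast; ring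
        rw [this, pvFc_succ (by positivity), pvG_mul]
        push_cast
        ring
      · intro x hx hxc
        have : (W ++ [c]).count x = W.count x := by
          simp [List.count_append, Ne.symm hxc]
        rw [this]
    simp only [pvPhi, hlen, hprod]
    ring
  · have hprod : ((PySem.List.dedup (W ++ [c])).map (fun x => pvG (pvFc (((W ++ [c]).count x : Int))))).prod
        = ((PySem.List.dedup W).map (fun x => pvG (pvFc ((W.count x : Int))))).prod := by
      rw [pvDedup_snoc, if_neg hc, List.map_append, List.prod_append]
      have hc0 : (W ++ [c]).count c = 1 := by
        simp [List.count_append, List.count_eq_zero.mpr hc]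
      have h1 : ((([c] : List Char)).map (fun x => pvG (pvFc (((W ++ [c]).count x : Int))))).prod = 1 := by
        simp only [List.map_cons, List.map_nil, List.prod_cons, List.prod_nil, mul_one, hc0,
          Nat.cast_one, pvFc_one, pvG_one]
      rw [h1, mul_one]
      refine congrArg List.prod (List.map_congr_left ?_)
      intro x hx
      have hxW : x ∈ W := by
        rw [PySem.List.dedup_eq_ofList] at hx
        exact (PySem.Set.mem_ofList W x).mp hx
      have hxc : x ≠ c := fun h => hc (h ▸ hxW)
      have : (W ++ [c]).count x = W.count x := by
        simp [List.count_append, Ne.symm hxc]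
      rw [this]
    have hcnt : (W.count c : pvK) + 1 = 1 := by
      simp [List.count_eq_zero.mpr hc]
    simp only [pvPhi, hlen, hprod, hcnt, pvG_one]
    ring

-- counts and dict components of the single-category B fold
lemma pvBfold1_snd (W : List Char) (r n : Int) (d : PySem.Dict Char Int) :
    (W.foldl pvBStep1 (r, n, d)).2
      = (n + W.length, W.foldl (fun d x => d.modify x 0 (· + 1)) d) := by
  induction W generalizing r n d with
  | nil => simp
  | cons x xs ih =>
    rw [List.foldl_cons, List.foldl_cons,
      show pvBStep1 (r, n, d) x
        = (pvModDiv (PySem.Int.mod (r * (n + 1)) pvMOD) ((d.modify x 0 (· + 1)).getD x 0),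
            n + 1, d.modify x 0 (· + 1)) from rfl,
      ih]
    simp only [Prod.mk.injEq, List.length_cons]
    exact ⟨by push_cast; ring, trivial⟩

lemma pvCast_bfold1 (W : List Char) :
    (((W.foldl pvBStep1 (1, 0, PySem.Dict.empty)).1 : Int) : pvK) = pvPhi W := by
  induction W using List.reverseRecOn with
  | nil =>
    simp [pvPhi, pvFc, PySem.List.pyRange_one_eq_nil (by norm_num : (1:ℤ) ≤ 2), PySem.List.dedup]
  | append_singleton W c ih =>
    rw [List.foldl_append, List.foldl_cons, List.foldl_nil]
    have hsnd := pvBfold1_snd W 1 0 PySem.Dict.empty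
    have hd : (W.foldl pvBStep1 (1, 0, PySem.Dict.empty)).2.2 = PySem.Dict.counter W := by
      rw [hsnd, PySem.Dict.counter_eq_foldl]
    have hn : (W.foldl pvBStep1 (1, 0, PySem.Dict.empty)).2.1 = (W.length : Int) := by
      rw [hsnd]; simp
    simp only [pvBStep1, hd, hn]
    rw [pvCast_modDiv, pvCast_mod, PySem.Dict.getD_modify_self, PySem.Dict.getD_counter]
    push_cast
    rw [ih, pvPhi_snoc]

-- the two-category A fold splits into vowel and consonant parts
lemma pvAfold (L : List Char) (d1 : PySem.Dict Char Int) (n1 : Int) (d2 : PySem.Dict Char Int) (n2 : Int) :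
    L.foldl pvAStep (d1, n1, d2, n2)
      = ((L.filter (fun c => pvVowels.contains c)).foldl (fun d x => d.modify x 0 (· + 1)) d1,
         n1 + (L.filter (fun c => pvVowels.contains c)).length,
         (L.filter (fun c => ! pvVowels.contains c)).foldl (fun d x => d.modify x 0 (· + 1)) d2,
         n2 + (L.filter (fun c => ! pvVowels.contains c)).length) := by
  induction L generalizing d1 n1 d2 n2 with
  | nil => simp
  | cons x xs ih =>
    by_cases hx : pvVowels.contains x
    · have hfV : List.filter (fun c => pvVowels.contains c) (x :: xs)
          = x :: List.filter (fun c => pvVowels.contains c) xs := by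
        rw [List.filter_cons, if_pos hx]
      have hfC : List.filter (fun c => ! pvVowels.contains c) (x :: xs)
          = List.filter (fun c => ! pvVowels.contains c) xs := by
        rw [List.filter_cons, if_neg (by rw [hx]; decide)]
      rw [List.foldl_cons, show pvAStep (d1, n1, d2, n2) x
          = (d1.modify x 0 (· + 1), n1 + 1, d2, n2) from by
        unfold pvAStep; rw [if_pos hx], ih, hfV, hfC, List.foldl_cons, List.length_cons]
      refine Prod.ext rfl (Prod.ext ?_ rfl)
      push_cast; ring
    · have hxf : pvVowels.contains x = false := by
        cases h : pvVowels.contains x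
        · rfl
        · exact absurd h hx
      have hfV : List.filter (fun c => pvVowels.contains c) (x :: xs)
          = List.filter (fun c => pvVowels.contains c) xs := by
        rw [List.filter_cons, if_neg hx]
      have hfC : List.filter (fun c => ! pvVowels.contains c) (x :: xs)
          = x :: List.filter (fun c => ! pvVowels.contains c) xs := by
        rw [List.filter_cons, if_pos (by rw [hxf]; decide)]
      rw [List.foldl_cons, show pvAStep (d1, n1, d2, n2) x
          = (d1, n1, d2.modify x 0 (· + 1), n2 + 1) from by
        unfold pvAStep; rw [if_neg hx], ih, hfV, hfC, List.foldl_cons, List.length_cons]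
      refine Prod.ext rfl (Prod.ext rfl (Prod.ext rfl ?_))
      push_cast; ring

-- the six-component B fold splits into two single-category folds
lemma pvBfold (L : List Char) (r1 r2 vc cc : Int) (vf cf : PySem.Dict Char Int) :
    L.foldl pvBStep (r1, r2, vc, cc, vf, cf)
      = (((L.filter (fun c => pvVowels.contains c)).foldl pvBStep1 (r1, vc, vf)).1,
         ((L.filter (fun c => ! pvVowels.contains c)).foldl pvBStep1 (r2, cc, cf)).1,
         ((L.filter (fun c => pvVowels.contains c)).foldl pvBStep1 (r1, vc, vf)).2.1,
         ((L.filter (fun c => ! pvVowels.contains c)).foldl pvBStep1 (r2, cc, cf)).2.1,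
         ((L.filter (fun c => pvVowels.contains c)).foldl pvBStep1 (r1, vc, vf)).2.2,
         ((L.filter (fun c => ! pvVowels.contains c)).foldl pvBStep1 (r2, cc, cf)).2.2) := by
  induction L generalizing r1 r2 vc cc vf cf with
  | nil => simp
  | cons x xs ih =>
    by_cases hx : pvVowels.contains x
    · have hfV : List.filter (fun c => pvVowels.contains c) (x :: xs)
          = x :: List.filter (fun c => pvVowels.contains c) xs := by
        rw [List.filter_cons, if_pos hx]
      have hfC : List.filter (fun c => ! pvVowels.contains c) (x :: xs)
          = List.filter (fun c => ! pvVowels.contains c) xs := by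
        rw [List.filter_cons, if_neg (by rw [hx]; decide)]
      rw [List.foldl_cons, show pvBStep (r1, r2, vc, cc, vf, cf) x
          = (pvModDiv (PySem.Int.mod (r1 * (vc + 1)) pvMOD) ((vf.modify x 0 (· + 1)).getD x 0),
             r2, vc + 1, cc, vf.modify x 0 (· + 1), cf) from by
        unfold pvBStep; rw [if_pos hx], ih, hfV, hfC, List.foldl_cons]
      rfl
    · have hxf : pvVowels.contains x = false := by
        cases h : pvVowels.contains x
        · rfl
        · exact absurd h hx
      have hfV : List.filter (fun c => pvVowels.contains c) (x :: xs)
          = List.filter (fun c => pvVowels.contains c) xs := by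
        rw [List.filter_cons, if_neg hx]
      have hfC : List.filter (fun c => ! pvVowels.contains c) (x :: xs)
          = x :: List.filter (fun c => ! pvVowels.contains c) xs := by
        rw [List.filter_cons, if_pos (by rw [hxf]; decide)]
      rw [List.foldl_cons, show pvBStep (r1, r2, vc, cc, vf, cf) x
          = (r1, pvModDiv (PySem.Int.mod (r2 * (cc + 1)) pvMOD) ((cf.modify x 0 (· + 1)).getD x 0),
             vc, cc + 1, vf, cf.modify x 0 (· + 1)) from by
        unfold pvBStep; rw [if_neg hx], ih, hfV, hfC, List.foldl_cons]
      rfl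

-- ===== VERDICT (by name: the statement is the Claim_ definition above) =====
theorem find_well_structured_words_spec : Claim_equal_find_well_structured_words := by
  intro S _
  show find_well_structured_words S = find_well_structured_words_alt S
  set L := S.toList with hL
  set V := L.filter (fun c => pvVowels.contains c) with hV
  set C := L.filter (fun c => ! pvVowels.contains c) with hC
  have hA := pvAfold L PySem.Dict.empty 0 PySem.Dict.empty 0
  have hB := pvBfold L 1 1 0 0 PySem.Dict.empty PySem.Dict.empty
  have hVn := pvBfold1_snd V 1 0 PySem.Dict.empty
  have hCn := pvBfold1_snd C 1 0 PySem.Dict.empty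
  simp only [find_well_structured_words, find_well_structured_words_alt, ← hL, ← hV, ← hC,
    hA, hB, zero_add]
  have hVc : (V.foldl pvBStep1 (1, 0, PySem.Dict.empty)).2.1 = (V.length : Int) := by
    rw [hVn]; simp
  have hCc : (C.foldl pvBStep1 (1, 0, PySem.Dict.empty)).2.1 = (C.length : Int) := by
    rw [hCn]; simp
  rw [hVc, hCc]
  by_cases hguard : (C.length : Int) < (V.length : Int)
  · simp [hguard]
  · simp only [if_neg hguard]
    apply pvMod_congr
    push_cast
    rw [← PySem.Dict.counter_eq_foldl, ← PySem.Dict.counter_eq_foldl,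
      pvCast_aRes, pvCast_aRes, pvCast_bfold1, pvCast_bfold1]
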